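-- pv_equiv track=rewrite | github.com/2749085790/edu-ai-assistant | src/core/lesson_prep/content_generator.py | _parse_teaching_process
-- ===== SOURCE A (Python) =====
-- def _parse_teaching_process(section: str) -> list:
--     """解析教学过程为环节列表"""
--     steps = []
--     current_step = None
--     lines = section.split("\n")
--
--     for line in lines:
--         if line.strip().startswith("### "):
--             if current_step:
--                 steps.append(current_step)
--             current_step = {
--                 "title": line.strip().replace("### ", ""),
--                 "content": "",
--             }
--         elif current_step:
--             current_step["content"] += line + "\n"
--
--     if current_step:
--         steps.append(current_step)
--
--     return steps
-- ===== SOURCE B (Python) =====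
-- def _parse_teaching_process(section: str) -> list:
--     """Chunking re-implementation: skip the preamble, then consume one
--     header-plus-body block at a time with an index cursor."""
--     lines = section.split("\n")
--     k = 0
--     # skip everything before the first header
--     while k < len(lines) and not lines[k].strip().startswith("### "):
--         k += 1
--     steps = []
--     while k < len(lines):
--         header = lines[k]
--         k += 1
--         content = ""
--         while k < len(lines) and not lines[k].strip().startswith("### "):
--             content += lines[k] + "\n"
--             k += 1
--         steps.append({
--             "title": header.strip().replace("### ", ""),
--             "content": content,
--         })
--     return steps
-- ===== Notes on version B (the rewrite author's own statement) =====
-- stated objective: alternative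
-- what changed: Replaces A's single-pass state machine (running current_step accumulator flushed on each header) by a cursor-based chunker: skip the preamble, then repeatedly take one header and span its body lines, emitting each complete step directly.
import Mathlib
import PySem

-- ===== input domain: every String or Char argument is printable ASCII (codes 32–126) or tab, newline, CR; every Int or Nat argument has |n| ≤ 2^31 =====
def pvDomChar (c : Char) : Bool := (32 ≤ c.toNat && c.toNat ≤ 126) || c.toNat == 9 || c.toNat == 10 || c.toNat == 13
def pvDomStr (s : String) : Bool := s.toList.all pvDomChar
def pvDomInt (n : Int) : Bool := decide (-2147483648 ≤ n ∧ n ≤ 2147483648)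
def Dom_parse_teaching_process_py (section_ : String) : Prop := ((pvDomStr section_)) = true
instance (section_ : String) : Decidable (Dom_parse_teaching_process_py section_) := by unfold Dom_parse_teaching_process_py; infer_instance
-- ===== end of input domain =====

-- B replaces A's running current_step state machine by a cursor/chunking pass (skip preamble, then one header+body block at a time); alternative decomposition, same cost.

-- ===== PORT A =====
-- the 2-key dict {"title": …, "content": …} is the assoc list [("title",…),("content",…)];
-- current_step["content"] += line + "\n" updates the value at key "content" in place (exact for this dict)
def pvAddContent (c : List (String × String)) (line : String) : List (String × String) :=
  c.map (fun p => if p.1 == "content" then (p.1, p.2 ++ line ++ "\n") else p)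

-- the for-loop of A, state = (steps, current_step); the trailing 'if current_step: steps.append' is the base case
def pvALoop : List String → List (List (String × String)) → Option (List (String × String)) → List (List (String × String))
  | [], steps, cur => match cur with | some c => steps ++ [c] | none => steps
  | line :: rest, steps, cur =>
    if PySem.Str.startswith (PySem.Str.strip line) "### " then
      pvALoop rest (match cur with | some c => steps ++ [c] | none => steps)
        (some [("title", PySem.Str.replace (PySem.Str.strip line) "### " ""), ("content", "")])
    else
      match cur with
      | some c => pvALoop rest steps (some (pvAddContent c line))
      | none => pvALoop rest steps cur

def parse_teaching_process_py (section_ : String) : List (List (String × String)) :=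
  pvALoop ((PySem.Str.split? section_ "\n").getD []) [] none

-- ===== PORT B =====
def pvIsHeader (l : String) : Bool := PySem.Str.startswith (PySem.Str.strip l) "### "

-- the outer while of B: one header + its body span per step
def pvChunks : List String → List (List (String × String))
  | [] => []
  | h :: rest =>
    [("title", PySem.Str.replace (PySem.Str.strip h) "### " ""),
     ("content", (rest.takeWhile (fun l => !pvIsHeader l)).foldl (fun a l => a ++ l ++ "\n") "")]
      :: pvChunks (rest.dropWhile (fun l => !pvIsHeader l))
termination_by l => l.length
decreasing_by
  simpa using Nat.lt_succ_of_le (List.length_dropWhile_le _ _)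

def parse_teaching_process_py_alt (section_ : String) : List (List (String × String)) :=
  pvChunks (((PySem.Str.split? section_ "\n").getD []).dropWhile (fun l => !pvIsHeader l))

-- ===== PRECONDITION & SPEC =====
def Spec_parse_teaching_process_py (section_ : String) (out : List (List (String × String))) : Prop := out = parse_teaching_process_py_alt section_
instance (section_ : String) (out : List (List (String × String))) : Decidable (Spec_parse_teaching_process_py section_ out) := by unfold Spec_parse_teaching_process_py; infer_instance

-- ===== CLAIM (what is proved, stated in full; the proofs are below) =====
def Claim_equal_parse_teaching_process_py : Prop := ∀ (section_ : String), Dom_parse_teaching_process_py section_ → Spec_parse_teaching_process_py section_ (parse_teaching_process_py section_)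

-- ===== LEMMAS AND PROOFS =====

theorem pvAddContent_eq (t s line : String) :
    pvAddContent [("title", t), ("content", s)] line = [("title", t), ("content", s ++ line ++ "\n")] := by
  simp [pvAddContent]

theorem pvALoop_prefix (lines : List String) (steps : List (List (String × String)))
    (cur : Option (List (String × String))) :
    pvALoop lines steps cur = steps ++ pvALoop lines [] cur := by
  induction lines generalizing steps cur with
  | nil => cases cur <;> simp [pvALoop]
  | cons line rest ih =>
    simp only [pvALoop]
    by_cases h : PySem.Str.startswith (PySem.Str.strip line) "### " = true
    · rw [if_pos h, if_pos h]
      cases cur with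
      | none => exact ih _ _
      | some c => rw [ih (steps ++ [c]), ih ([] ++ [c])]; simp
    · rw [if_neg h, if_neg h]
      cases cur with
      | none => exact ih _ _
      | some c => exact ih _ _

theorem pvALoop_some (lines : List String) (t s : String) :
    pvALoop lines [] (some [("title", t), ("content", s)]) =
      [("title", t), ("content", (lines.takeWhile (fun l => !pvIsHeader l)).foldl (fun a l => a ++ l ++ "\n") s)]
        :: pvChunks (lines.dropWhile (fun l => !pvIsHeader l)) := by
  induction lines generalizing t s with
  | nil => simp [pvALoop, pvChunks]
  | cons line rest ih =>
    simp only [pvALoop]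
    by_cases h : PySem.Str.startswith (PySem.Str.strip line) "### " = true
    · have hB : pvIsHeader line = true := h
      rw [if_pos h, pvALoop_prefix, ih]
      simp [pvChunks, hB]
    · have hB : pvIsHeader line = false := by
        simpa [pvIsHeader, Bool.not_eq_true] using h
      rw [if_neg h, pvAddContent_eq, ih]
      simp [hB]

theorem pvALoop_none (lines : List String) :
    pvALoop lines [] none = pvChunks (lines.dropWhile (fun l => !pvIsHeader l)) := by
  induction lines with
  | nil => simp [pvALoop, pvChunks]
  | cons line rest ih =>
    simp only [pvALoop]
    by_cases h : PySem.Str.startswith (PySem.Str.strip line) "### " = true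
    · have hB : pvIsHeader line = true := h
      rw [if_pos h, pvALoop_prefix, pvALoop_some]
      simp [pvChunks, hB]
    · have hB : pvIsHeader line = false := by
        simpa [pvIsHeader, Bool.not_eq_true] using h
      rw [if_neg h, ih]
      simp [hB]

-- ===== VERDICT (by name: the statement is the Claim_ definition above) =====
theorem parse_teaching_process_py_spec : Claim_equal_parse_teaching_process_py := by
  intro section_ _
  unfold Spec_parse_teaching_process_py parse_teaching_process_py parse_teaching_process_py_alt
  exact pvALoop_none _
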